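-- pv_equiv track=rewrite | github.com/jizhideFrank/software-programming | school-assignment/sokoban_solver/solution.py | minimum_distance_horizontal
-- ===== SOURCE A (Python) =====
-- def minimum_distance_horizontal(list_of_x_value, my_x_value):
--   greater = []
--   smaller = []
--   for num in list_of_x_value:
--     if num > my_x_value:
--       greater.append(num)
--     else:
--       smaller.append(num)
--
--   nearest_value_left = 0
--   nearest_value_right = 0
--   if len(greater) == 0:
--     nearest_value_right += 9999
--   else:
--     nearest_value_right += min(greater)
--
--   if len(smaller) == 0:
--     nearest_value_left += 0
--   else:
--     nearest_value_left += max(smaller)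
--
--   return (nearest_value_left, nearest_value_right)
-- ===== SOURCE B (Python) =====
-- def minimum_distance_horizontal(list_of_x_value, my_x_value):
--     best_left = None
--     best_right = None
--     for num in list_of_x_value:
--         if num > my_x_value:
--             if best_right is None or num < best_right:
--                 best_right = num
--         else:
--             if best_left is None or num > best_left:
--                 best_left = num
--     return (best_left if best_left is not None else 0,
--             best_right if best_right is not None else 9999)
-- ===== Notes on version B (the rewrite author's own statement) =====
-- stated objective: simpler
-- what changed: Replaces the partition-into-two-lists-then-min/max pipeline by a single pass that maintains only two optional scalars (best left <= x, best right > x), applying the sentinels 0/9999 only when a side was never seen.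
import Mathlib
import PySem

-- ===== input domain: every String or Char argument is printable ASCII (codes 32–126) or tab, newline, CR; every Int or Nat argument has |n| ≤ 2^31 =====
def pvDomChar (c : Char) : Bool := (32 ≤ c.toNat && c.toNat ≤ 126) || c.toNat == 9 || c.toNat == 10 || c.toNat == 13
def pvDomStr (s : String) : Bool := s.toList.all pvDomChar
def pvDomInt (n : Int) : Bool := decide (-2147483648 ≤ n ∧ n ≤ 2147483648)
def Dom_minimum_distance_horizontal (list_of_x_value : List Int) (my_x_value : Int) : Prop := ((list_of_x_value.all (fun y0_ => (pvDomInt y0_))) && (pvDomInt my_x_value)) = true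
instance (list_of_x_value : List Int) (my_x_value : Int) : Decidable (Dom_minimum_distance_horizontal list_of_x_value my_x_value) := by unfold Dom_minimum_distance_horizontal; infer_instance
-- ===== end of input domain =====

-- B replaces A's partition-into-two-lists + min/max pipeline by a single O(1)-space pass
-- maintaining two optional scalars (simpler decomposition; return values proved identical).


-- ===== PORT A =====
def minimum_distance_horizontal (list_of_x_value : List Int) (my_x_value : Int) : Int × Int :=
  let p :=
    list_of_x_value.foldl
      (fun (acc : List Int × List Int) num =>
        if my_x_value < num then (acc.1 ++ [num], acc.2) else (acc.1, acc.2 ++ [num]))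
      ([], [])
  let greater := p.1
  let smaller := p.2
  let nearest_value_right : Int :=
    if greater.length = 0 then 0 + 9999
    else 0 + (PySem.List.min? greater (fun x => x)).getD 0   -- min(greater); branch guards nonempty
  let nearest_value_left : Int :=
    if smaller.length = 0 then 0 + 0
    else 0 + (PySem.List.max? smaller (fun x => x)).getD 0   -- max(smaller); branch guards nonempty
  (nearest_value_left, nearest_value_right)

-- ===== PORT B =====
-- B-side helpers: the two 'best-so-far' updates of B's loop body
def pvMinStep (acc : Option Int) (num : Int) : Option Int :=
  match acc with
  | none => some num                              -- best_right is None
  | some r => if num < r then some num else some r  -- or num < best_right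
def pvMaxStep (acc : Option Int) (num : Int) : Option Int :=
  match acc with
  | none => some num                              -- best_left is None
  | some l => if l < num then some num else some l  -- or num > best_left

def minimum_distance_horizontal_alt (list_of_x_value : List Int) (my_x_value : Int) : Int × Int :=
  let s :=
    list_of_x_value.foldl
      (fun (acc : Option Int × Option Int) num =>
        if my_x_value < num then (acc.1, pvMinStep acc.2 num)
        else (pvMaxStep acc.1 num, acc.2))
      (none, none)
  (s.1.getD 0, s.2.getD 9999)

-- ===== PRECONDITION & SPEC =====
def Spec_minimum_distance_horizontal (list_of_x_value : List Int) (my_x_value : Int) (out : Int × Int) : Prop := out = minimum_distance_horizontal_alt list_of_x_value my_x_value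
instance (list_of_x_value : List Int) (my_x_value : Int) (out : Int × Int) : Decidable (Spec_minimum_distance_horizontal list_of_x_value my_x_value out) := by unfold Spec_minimum_distance_horizontal; infer_instance

-- ===== CLAIM (what is proved, stated in full; the proofs are below) =====
def Claim_equal_minimum_distance_horizontal : Prop := ∀ (list_of_x_value : List Int) (my_x_value : Int), Dom_minimum_distance_horizontal list_of_x_value my_x_value → Spec_minimum_distance_horizontal list_of_x_value my_x_value (minimum_distance_horizontal list_of_x_value my_x_value)

-- ===== LEMMAS AND PROOFS =====

-- A's partition loop, decomposed: the pair fold is the two filters.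
theorem pvA_fold (my : Int) : ∀ (xs : List Int) (g s : List Int),
    xs.foldl
      (fun (acc : List Int × List Int) num =>
        if my < num then (acc.1 ++ [num], acc.2) else (acc.1, acc.2 ++ [num]))
      (g, s)
    = (g ++ xs.filter (fun n => decide (my < n)), s ++ xs.filter (fun n => !decide (my < n))) := by
  intro xs
  induction xs with
  | nil => simp
  | cons x t ih =>
    intro g s
    by_cases h : my < x <;> simp [h, ih, List.filter_cons]

-- B's pair fold, decomposed: each component is the corresponding one-option fold over its filter.
theorem pvB_fold (my : Int) : ∀ (xs : List Int) (bl br : Option Int),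
    xs.foldl
      (fun (acc : Option Int × Option Int) num =>
        if my < num then (acc.1, pvMinStep acc.2 num)
        else (pvMaxStep acc.1 num, acc.2))
      (bl, br)
    = ((xs.filter (fun n => !decide (my < n))).foldl pvMaxStep bl,
       (xs.filter (fun n => decide (my < n))).foldl pvMinStep br) := by
  intro xs
  induction xs with
  | nil => simp
  | cons x t ih =>
    intro bl br
    by_cases h : my < x <;> simp [h, ih, List.filter_cons]

-- Python's min(l) (= PySem.List.min? with identity key) is B's pvMinStep fold; same for max.
theorem pvMin_eq (l : List Int) : PySem.List.min? l (fun x => x) = l.foldl pvMinStep none := by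
  simp only [PySem.List.min?]
  apply List.foldl_ext
  intro acc x _
  cases acc <;> simp [pvMinStep]

theorem pvMax_eq (l : List Int) : PySem.List.max? l (fun x => x) = l.foldl pvMaxStep none := by
  simp only [PySem.List.max?]
  apply List.foldl_ext
  intro acc x _
  cases acc <;> simp [pvMaxStep]

-- a some accumulator stays some
theorem pvMinFold_some : ∀ (l : List Int) (m : Int), ∃ k, l.foldl pvMinStep (some m) = some k := by
  intro l
  induction l with
  | nil => exact fun m => ⟨m, rfl⟩
  | cons x t ih =>
    intro m
    by_cases h : x < m <;> simp [List.foldl_cons, pvMinStep, h] <;> exact ih _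

theorem pvMaxFold_some : ∀ (l : List Int) (m : Int), ∃ k, l.foldl pvMaxStep (some m) = some k := by
  intro l
  induction l with
  | nil => exact fun m => ⟨m, rfl⟩
  | cons x t ih =>
    intro m
    by_cases h : m < x <;> simp [List.foldl_cons, pvMaxStep, h] <;> exact ih _

-- ===== VERDICT (by name: the statement is the Claim_ definition above) =====
theorem minimum_distance_horizontal_spec : Claim_equal_minimum_distance_horizontal := by
  intro xs my _
  unfold Spec_minimum_distance_horizontal minimum_distance_horizontal minimum_distance_horizontal_alt
  rw [pvA_fold my xs [] [], pvB_fold my xs none none]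
  simp only [List.nil_append, pvMin_eq, pvMax_eq]
  set g := xs.filter (fun n => decide (my < n)) with hg
  set s := xs.filter (fun n => !decide (my < n)) with hs
  rw [Prod.mk.injEq]
  constructor
  · -- left component
    cases s with
    | nil => simp
    | cons a t =>
      simp only [List.foldl_cons, List.length_cons, pvMaxStep]
      obtain ⟨k, hk⟩ := pvMaxFold_some t a
      simp [hk]
  · -- right component
    cases g with
    | nil => simp
    | cons a t =>
      simp only [List.foldl_cons, List.length_cons, pvMinStep]
      obtain ⟨k, hk⟩ := pvMinFold_some t a
      simp [hk]
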